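-- pv_equiv track=rewrite | github.com/tsimkins/svn-import-agSciencesCollege | agSciencesCollege/agCommon/branches/psu/portlet/linkicon.py | getIconClass
-- ===== SOURCE A (Python) =====
-- def getIconClass(icon):
--     icon_classes = {
--         'icons/blogger.png' : 'sprite sprite-blogger',
--         'icons/contact.png' : 'sprite sprite-contact',
--         'icons/directory.png' : 'sprite sprite-directory',
--         'icons/facebook.png' : 'sprite sprite-facebook',
--         'icons/feed.png' : 'sprite sprite-feed',
--         'icons/flickr.png' : 'sprite sprite-flickr',
--         'icons/instagram.png' : 'sprite sprite-instagram',
--         'icons/linkedin.png' : 'sprite sprite-linkedin',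
--         'icons/message.png' : 'sprite sprite-message',
--         'icons/podcast.png' : 'sprite sprite-podcast',
--         'icons/twitter.png' : 'sprite sprite-twitter',
--         'icons/typepad.png' : 'sprite sprite-typepad',
--         'icons/youtube.png' : 'sprite sprite-youtube',
--     }
--
--     for k in icon_classes.keys():
--         if icon.endswith(k):
--             return icon_classes[k]
--
--     return 'icon'
-- ===== SOURCE B (Python) =====
-- _NAMES = ('blogger', 'contact', 'directory', 'facebook', 'feed', 'flickr',
--           'instagram', 'linkedin', 'message', 'podcast', 'twitter',
--           'typepad', 'youtube')
--
-- def getIconClass(icon):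
--     # Parse the candidate sprite name out of the path once, then rebuild the
--     # CSS class from it, instead of scanning a table of suffixes.
--     if icon.endswith('.png'):
--         name = icon[:-4].rpartition('/')[2]
--         if name in _NAMES and icon.endswith('icons/' + name + '.png'):
--             return 'sprite sprite-' + name
--     return 'icon'
-- ===== Notes on version B (the rewrite author's own statement) =====
-- stated objective: idiomatic
-- what changed: Instead of scanning the 13-entry suffix table with endswith, B parses the candidate sprite name out of the path once (strip '.png', rpartition on the last '/'), checks it against a set of known names plus one endswith, and rebuilds the CSS class from the captured name.
import Mathlib
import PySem

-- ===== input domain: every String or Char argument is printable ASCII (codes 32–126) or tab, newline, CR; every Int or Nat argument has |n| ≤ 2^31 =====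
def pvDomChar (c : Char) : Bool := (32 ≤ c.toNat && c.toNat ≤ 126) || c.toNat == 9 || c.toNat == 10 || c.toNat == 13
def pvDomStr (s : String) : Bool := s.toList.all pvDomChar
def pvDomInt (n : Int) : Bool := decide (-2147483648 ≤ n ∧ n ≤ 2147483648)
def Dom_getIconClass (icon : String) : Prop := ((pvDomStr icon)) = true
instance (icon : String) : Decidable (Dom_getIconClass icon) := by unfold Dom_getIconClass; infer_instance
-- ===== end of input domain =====

-- B parses the sprite name out of the path once (rpartition) and rebuilds the CSS
-- class from it, instead of A's scan of a 13-entry suffix table (objective: idiomatic).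

-- ===== PORT A =====
-- the dict literal, as an association list in insertion order
def iconClasses : List (String × String) :=
  [("icons/blogger.png", "sprite sprite-blogger"),
   ("icons/contact.png", "sprite sprite-contact"),
   ("icons/directory.png", "sprite sprite-directory"),
   ("icons/facebook.png", "sprite sprite-facebook"),
   ("icons/feed.png", "sprite sprite-feed"),
   ("icons/flickr.png", "sprite sprite-flickr"),
   ("icons/instagram.png", "sprite sprite-instagram"),
   ("icons/linkedin.png", "sprite sprite-linkedin"),
   ("icons/message.png", "sprite sprite-message"),
   ("icons/podcast.png", "sprite sprite-podcast"),
   ("icons/twitter.png", "sprite sprite-twitter"),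
   ("icons/typepad.png", "sprite sprite-typepad"),
   ("icons/youtube.png", "sprite sprite-youtube")]

-- 'for k in icon_classes.keys(): if icon.endswith(k): return icon_classes[k]'
-- (the dict's keys are distinct, so icon_classes[k] is the value paired with k)
def goA (icon : String) : List (String × String) → String
  | [] => "icon"
  | (k, v) :: rest => if PySem.Str.endswith icon k then v else goA icon rest

def getIconClass (icon : String) : String := goA icon iconClasses

-- ===== PORT B =====
def namesB : List String :=
  ["blogger", "contact", "directory", "facebook", "feed", "flickr", "instagram",
   "linkedin", "message", "podcast", "twitter", "typepad", "youtube"]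

-- s.rpartition('/')[2]: exactly the chars after the LAST '/' (all of s if no '/'),
-- computed via reverse/takeWhile
def afterLastSlash (s : List Char) : List Char :=
  ((s.reverse).takeWhile (· ≠ '/')).reverse

-- B's local variable: name = icon[:-4].rpartition('/')[2]
def nameOf (icon : String) : String :=
  String.ofList (afterLastSlash (PySem.Str.slice icon none (some (-4))).toList)

def getIconClass_alt (icon : String) : String :=
  if PySem.Str.endswith icon ".png" then
    if namesB.contains (nameOf icon)
        && PySem.Str.endswith icon ("icons/" ++ nameOf icon ++ ".png") then
      "sprite sprite-" ++ nameOf icon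
    else "icon"
  else "icon"

-- ===== PRECONDITION & SPEC =====
def Spec_getIconClass (icon : String) (out : String) : Prop := out = getIconClass_alt icon
instance (icon : String) (out : String) : Decidable (Spec_getIconClass icon out) := by unfold Spec_getIconClass; infer_instance

-- ===== CLAIM (what is proved, stated in full; the proofs are below) =====
def Claim_equal_getIconClass : Prop := ∀ (icon : String), Dom_getIconClass icon → Spec_getIconClass icon (getIconClass icon)

-- ===== LEMMAS AND PROOFS =====

-- the key string 'icons/<name>.png'
def keyStr (n : String) : String := "icons/" ++ n ++ ".png"

theorem names_no_slash : ∀ n ∈ namesB, '/' ∉ n.toList := by decide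

theorem names_key_mem : ∀ n ∈ namesB, (keyStr n, "sprite sprite-" ++ n) ∈ iconClasses := by
  decide

-- every entry of the table is (keyStr n, "sprite sprite-" ++ n) for some name n
theorem iconClasses_shape :
    ∀ kv ∈ iconClasses, ∃ n ∈ namesB, kv = (keyStr n, "sprite sprite-" ++ n) := by
  decide

theorem takeWhile_all_append (p : Char → Bool) (l r : List Char) (h : ∀ c ∈ l, p c) :
    (l ++ r).takeWhile p = l ++ r.takeWhile p := by
  rw [List.takeWhile_append]
  simp [List.takeWhile_eq_self_iff.mpr h]

-- the segment after the last '/' of p ++ '/' :: n is n, when n is slash-free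
theorem afterLastSlash_append (p n : List Char) (hn : '/' ∉ n) :
    afterLastSlash (p ++ '/' :: n) = n := by
  unfold afterLastSlash
  have h1 : (p ++ '/' :: n).reverse = n.reverse ++ ('/' :: p.reverse) := by simp
  rw [h1, takeWhile_all_append _ n.reverse _ (fun c hc => by
    simp only [decide_eq_true_eq, ne_eq]
    intro h
    exact hn (by rw [← h]; exact List.mem_reverse.mp hc))]
  simp

-- dropping the 4 chars of '.png' from the end
theorem stem_eq (cs P n : List Char) (h : (P ++ '/' :: n) ++ ".png".toList = cs) :
    cs.take (cs.length - 4) = P ++ '/' :: n := by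
  rw [← h, List.length_append]
  have h4 : (".png".toList).length = 4 := rfl
  rw [h4, Nat.add_sub_cancel, List.take_left]

-- if 'icons/<n>.png' is a suffix of cs, the parsed name of cs is n
theorem key_suffix_name (cs : List Char) (n : String) (hns : '/' ∉ n.toList)
    (h : (keyStr n).toList <:+ cs) :
    afterLastSlash (cs.take (cs.length - 4)) = n.toList := by
  obtain ⟨p, hp⟩ := h
  have hp2 : ((p ++ "icons".toList) ++ '/' :: n.toList) ++ ".png".toList = cs := by
    simpa [keyStr] using hp
  rw [stem_eq cs _ _ hp2, afterLastSlash_append _ _ hns]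

-- at most one key of the table is a suffix of a given string
theorem uniq_match {cs : List Char} {m n : String} (hm : m ∈ namesB) (hn : n ∈ namesB)
    (h1 : (keyStr m).toList <:+ cs) (h2 : (keyStr n).toList <:+ cs) : m = n := by
  have e1 := key_suffix_name cs m (names_no_slash m hm) h1
  have e2 := key_suffix_name cs n (names_no_slash n hn) h2
  have hl : m.toList = n.toList := by rw [← e1, ← e2]
  simpa using congrArg String.ofList hl

theorem goA_none (icon : String) (l : List (String × String))
    (h : ∀ kv ∈ l, PySem.Str.endswith icon kv.1 = false) : goA icon l = "icon" := by
  induction l with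
  | nil => rfl
  | cons kv rest ih =>
    obtain ⟨k, v⟩ := kv
    simp only [goA]
    rw [h (k, v) (by simp)]
    simpa using ih fun kv hkv => h kv (List.mem_cons_of_mem _ hkv)

theorem goA_found (icon : String) (l : List (String × String)) (k v : String)
    (hmem : (k, v) ∈ l) (hk : PySem.Str.endswith icon k = true)
    (huniq : ∀ k' v', (k', v') ∈ l → PySem.Str.endswith icon k' = true → k' = k ∧ v' = v) :
    goA icon l = v := by
  induction l with
  | nil => cases hmem
  | cons kv rest ih =>
    obtain ⟨k0, v0⟩ := kv
    simp only [goA]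
    by_cases h0 : PySem.Str.endswith icon k0 = true
    · rw [if_pos h0, (huniq k0 v0 (by simp) h0).2]
    · rw [if_neg h0]
      rcases List.mem_cons.mp hmem with heq | hmem'
      · have hkk : k = k0 := congrArg Prod.fst heq
        exact absurd (hkk ▸ hk) h0
      · exact ih hmem' fun k' v' h' hw => huniq k' v' (List.mem_cons_of_mem _ h') hw

-- B on a string that ends with a known key
theorem alt_pos (icon : String) (n : String) (hn : n ∈ namesB)
    (hsuf : (keyStr n).toList <:+ icon.toList) :
    getIconClass_alt icon = "sprite sprite-" ++ n := by
  obtain ⟨p, hp⟩ := hsuf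
  have hp2 : ((p ++ "icons".toList) ++ '/' :: n.toList) ++ ".png".toList = icon.toList := by
    simpa [keyStr] using hp
  have hpng : PySem.Str.endswith icon ".png" = true := by
    rw [PySem.Str.endswith_eq]
    exact (PySem.Chars.endswith_iff _ _).mpr ⟨_, hp2⟩
  have hname : nameOf icon = n := by
    unfold nameOf
    rw [PySem.Str.toList_slice, PySem.Chars.slice_eq_listSlice,
      PySem.List.slice_to_neg_ofNat icon.toList 4 (by omega),
      stem_eq icon.toList _ _ hp2, afterLastSlash_append _ _ (names_no_slash n hn)]
    simp
  have hmem : namesB.contains n = true := by simpa [List.contains_iff_mem] using hn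
  have hkey : PySem.Str.endswith icon ("icons/" ++ n ++ ".png") = true := by
    rw [PySem.Str.endswith_eq]
    refine (PySem.Chars.endswith_iff _ _).mpr ⟨p, ?_⟩
    simpa using hp2
  unfold getIconClass_alt
  rw [if_pos hpng, hname,
    if_pos (by rw [Bool.and_eq_true]; exact ⟨hmem, hkey⟩)]

-- B on a string that ends with none of the keys
theorem alt_neg (icon : String)
    (h : ∀ n ∈ namesB, ¬ (keyStr n).toList <:+ icon.toList) :
    getIconClass_alt icon = "icon" := by
  unfold getIconClass_alt
  by_cases hpng : PySem.Str.endswith icon ".png" = true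
  · rw [if_pos hpng]
    by_cases hmem : namesB.contains (nameOf icon) = true
    · have hk : PySem.Str.endswith icon ("icons/" ++ nameOf icon ++ ".png") = false := by
        rw [Bool.eq_false_iff]
        intro hk
        refine h (nameOf icon) (by simpa [List.contains_iff_mem] using hmem) ?_
        have := (PySem.Chars.endswith_iff _ _).mp (PySem.Str.endswith_eq .. ▸ hk)
        simpa [keyStr] using this
      rw [if_neg (by
        intro hc
        rw [Bool.and_eq_true] at hc
        rw [hk] at hc
        exact Bool.false_ne_true hc.2)]
    · rw [if_neg (by
        intro hc
        rw [Bool.and_eq_true] at hc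
        exact hmem hc.1)]
  · rw [if_neg hpng]

-- ===== VERDICT (by name: the statement is the Claim_ definition above) =====
theorem getIconClass_spec : Claim_equal_getIconClass := by
  intro icon _
  unfold Spec_getIconClass getIconClass
  by_cases hex : ∃ n ∈ namesB, (keyStr n).toList <:+ icon.toList
  · obtain ⟨n, hn, hsuf⟩ := hex
    rw [alt_pos icon n hn hsuf]
    refine goA_found icon iconClasses (keyStr n) ("sprite sprite-" ++ n)
      (names_key_mem n hn) ?_ ?_
    · rw [PySem.Str.endswith_eq]
      exact (PySem.Chars.endswith_iff _ _).mpr hsuf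
    · intro k' v' hmem hk'
      obtain ⟨m, hm, hkv⟩ := iconClasses_shape (k', v') hmem
      have hk'eq : k' = keyStr m := congrArg Prod.fst hkv
      have hv'eq : v' = "sprite sprite-" ++ m := congrArg Prod.snd hkv
      have hsufm : (keyStr m).toList <:+ icon.toList := by
        have := (PySem.Chars.endswith_iff _ _).mp (PySem.Str.endswith_eq .. ▸ hk')
        rwa [hk'eq] at this
      have hmn : m = n := uniq_match hm hn hsufm hsuf
      subst hmn
      exact ⟨hk'eq, hv'eq⟩
  · push_neg at hex
    rw [alt_neg icon hex]
    refine goA_none icon iconClasses fun kv hkv => ?_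
    obtain ⟨m, hm, hkv'⟩ := iconClasses_shape kv hkv
    rw [Bool.eq_false_iff]
    intro hw
    refine hex m hm ?_
    have := (PySem.Chars.endswith_iff _ _).mp (PySem.Str.endswith_eq .. ▸ hw)
    rwa [hkv'] at this
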